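-- pv_equiv track=rewrite | github.com/cekkr/primes-society-simulator.py | prime-society.py | get_prime_position
-- ===== SOURCE A (Python) =====
-- import math
--
-- def is_prime(n: int) -> bool:
--    """Check if a number is prime"""
--    if n < 2:
--        return False
--    for i in range(2, int(math.sqrt(n)) + 1):
--        if n % i == 0:
--            return False
--    return True
--
-- def get_prime_position(n: int) -> int:
--    """Get the position of a prime in the sequence (2=1, 3=2, 5=3, etc.)"""
--    if not is_prime(n):
--        return 0
--    position = 0
--    current = 2
--    while current <= n:
--        if is_prime(current):
--            position += 1
--            if current == n:
--                return position
--        current += 1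
--    return 0
-- ===== SOURCE B (Python) =====
-- import math
--
-- def get_prime_position(n: int) -> int:
--     """Get the position of a prime in the sequence (2=1, 3=2, 5=3, etc.)"""
--     if n < 2:
--         return 0
--     r = math.isqrt(n)
--     if any(n % d == 0 for d in range(2, r + 1)):
--         return 0
--     sieve = [True] * (n + 1)
--     sieve[0] = False
--     sieve[1] = False
--     for d in range(2, r + 1):
--         for m in range(d * d, n + 1, d):
--             sieve[m] = False
--     return sum(sieve)
-- ===== Notes on version B (the rewrite author's own statement) =====
-- stated objective: faster
-- what changed: A counts primes up to n by running a fresh trial-division primality test on every candidate; B keeps A's cheap composite early-out but replaces the counting pass by a divisor-marking sieve over [0..n] and returns sum(sieve).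
import Mathlib
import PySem

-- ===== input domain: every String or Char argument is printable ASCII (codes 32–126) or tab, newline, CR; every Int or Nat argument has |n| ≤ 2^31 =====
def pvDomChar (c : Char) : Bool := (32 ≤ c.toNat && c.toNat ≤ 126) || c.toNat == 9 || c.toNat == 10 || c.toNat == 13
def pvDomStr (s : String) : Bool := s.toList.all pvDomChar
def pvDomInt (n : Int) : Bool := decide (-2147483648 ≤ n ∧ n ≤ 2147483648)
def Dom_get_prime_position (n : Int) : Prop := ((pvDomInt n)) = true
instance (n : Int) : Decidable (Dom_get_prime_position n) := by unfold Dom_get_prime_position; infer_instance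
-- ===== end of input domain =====

-- B replaces A's per-candidate trial division (for each current ≤ n, test all divisors up to √current)
-- by a single divisor-marking sieve on [0..n] (fewer division tests; a different algorithm).

-- ===== PORT A =====
-- int(math.sqrt(n)) is ported as Int.sqrt n: exact on this domain (0 ≤ n ≤ 2^31, where the
-- correctly-rounded double sqrt truncates to the integer square root; n < 2 is handled before).
def is_prime (n : Int) : Bool :=
  if n < 2 then false
  else (PySem.List.pyRange 2 (Int.sqrt n + 1) 1).all (fun i => !(PySem.Int.mod n i == 0))

-- the 'while current <= n' loop of A, with its two early returns
def aLoop (n position current : Int) : Int :=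
  if _h : current ≤ n then
    if is_prime current then
      (if current == n then position + 1
       else aLoop n (position + 1) (current + 1))
    else aLoop n position (current + 1)
  else 0
termination_by (n + 1 - current).toNat
decreasing_by all_goals omega

def get_prime_position (n : Int) : Int :=
  if !is_prime n then 0
  else aLoop n 0 2

-- ===== PORT B =====
-- transliteration of Source B: early 0 for composite n (any-divisor test), otherwise a
-- divisor-marking sieve on [0..n] and sum(sieve); math.isqrt(n) is Int.sqrt n (exact on 0 ≤ n).
def get_prime_position_alt (n : Int) : Int :=
  if n < 2 then 0
  else
    let r := Int.sqrt n
    if (PySem.List.pyRange 2 (r + 1) 1).any (fun d => PySem.Int.mod n d == 0) then 0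
    else
      let sieve := List.replicate (n + 1).toNat true
      let sieve := PySem.List.pySetD sieve 0 false
      let sieve := PySem.List.pySetD sieve 1 false
      let sieve := (PySem.List.pyRange 2 (r + 1) 1).foldl (fun s d =>
        (PySem.List.pyRange (d * d) (n + 1) d).foldl
          (fun s m => PySem.List.pySetD s m false) s) sieve
      sieve.foldl (fun acc b => acc + (if b then 1 else 0)) 0

-- ===== PRECONDITION & SPEC =====
def Spec_get_prime_position (n : Int) (out : Int) : Prop := out = get_prime_position_alt n
instance (n : Int) (out : Int) : Decidable (Spec_get_prime_position n out) := by unfold Spec_get_prime_position; infer_instance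

-- ===== CLAIM (what is proved, stated in full; the proofs are below) =====
def Claim_equal_get_prime_position : Prop := ∀ (n : Int), Dom_get_prime_position n → Spec_get_prime_position n (get_prime_position n)

-- ===== LEMMAS AND PROOFS =====

lemma le_sqrt_iff (n i : Int) (hn : 0 ≤ n) (hi : 0 ≤ i) : i ≤ Int.sqrt n ↔ i * i ≤ n := by
  rw [show Int.sqrt n = ((Nat.sqrt n.toNat : Nat) : Int) by simp [Int.sqrt]]
  have hi' : ((i.toNat : Nat) : Int) = i := Int.toNat_of_nonneg hi
  have hn' : ((n.toNat : Nat) : Int) = n := Int.toNat_of_nonneg hn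
  have key : i * i ≤ n ↔ i.toNat * i.toNat ≤ n.toNat := by
    rw [← hi', ← hn']; exact_mod_cast Iff.rfl
  rw [key, ← Nat.le_sqrt]
  omega

-- A's trial division characterized: n ≥ 2 with no divisor d, 2 ≤ d, d*d ≤ n
lemma is_prime_iff (n : Int) :
    is_prime n = true ↔ 2 ≤ n ∧ ∀ d : Int, 2 ≤ d → d * d ≤ n → ¬ d ∣ n := by
  by_cases h : n < 2
  · simp [is_prime, h]
  · rw [not_lt] at h
    simp only [is_prime, if_neg (by omega : ¬ n < 2), List.all_eq_true,
      PySem.List.mem_pyRange_one, Bool.not_eq_eq_eq_not, Bool.not_true, beq_eq_false_iff_ne]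
    constructor
    · intro hall
      refine ⟨h, fun d h2 hdd hdvd => ?_⟩
      have hd : d ≤ Int.sqrt n := (le_sqrt_iff n d (by omega) (by omega)).mpr hdd
      have := hall d ⟨h2, by omega⟩
      exact this ((PySem.Int.mod_eq_zero_iff_dvd n d).mpr hdvd)
    · intro ⟨_, hno⟩ i ⟨h2, hlt⟩ hmod
      have hii : i * i ≤ n := (le_sqrt_iff n i (by omega) (by omega)).mp (by omega)
      exact hno i h2 hii ((PySem.Int.mod_eq_zero_iff_dvd n i).mp hmod)

-- A's while loop counts the primes in [current, n] (n itself prime, so the early return fires at n)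
lemma aLoop_eq (n : Int) (hn : is_prime n = true) :
    ∀ (current position : Int), current ≤ n →
    aLoop n position current =
      position + ((PySem.List.pyRange current (n + 1) 1).countP (fun k => is_prime k) : Int) := by
  have main : ∀ (m : Nat) (current position : Int), current ≤ n → (n + 1 - current).toNat = m →
      aLoop n position current =
      position + ((PySem.List.pyRange current (n + 1) 1).countP (fun k => is_prime k) : Int) := by
    intro m
    induction m with
    | zero => intro current position hc hm; omega
    | succ m ih =>
      intro current position hc hm
      rw [aLoop, dif_pos hc]
      by_cases heq : current = n
      · subst heq
        rw [if_pos hn, if_pos (by simp)]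
        rw [PySem.List.pyRange_one_singleton]
        simp [List.countP, List.countP.go, hn]
      · have hlt : current < n := by omega
        rw [PySem.List.pyRange_one_cons (by omega : current < n + 1), List.countP_cons]
        have hrec := ih (current + 1) (position + 1) (by omega) (by omega)
        have hrec2 := ih (current + 1) position (by omega) (by omega)
        by_cases hp : is_prime current = true
        · rw [if_pos hp, if_neg (by simp [heq]), hrec]
          simp [hp]; ring
        · rw [if_neg hp, hrec2]
          simp [hp]
  intro current position hc
  exact main (n + 1 - current).toNat current position hc rfl

-- a fold of single-index clears, read back pointwise
lemma setFold_getElem? (ms : List Int) (s : List Bool) (k : Nat) (hms : ∀ m ∈ ms, 0 ≤ m) :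
    (ms.foldl (fun s m => PySem.List.pySetD s m false) s)[k]? =
      if (k : Int) ∈ ms ∧ k < s.length then some false else s[k]? := by
  induction ms generalizing s with
  | nil => simp
  | cons m ms ih =>
    have hm : 0 ≤ m := hms m (by simp)
    simp only [List.foldl_cons]
    rw [PySem.List.pySetD_of_nonneg _ _ hm]
    rw [ih _ (fun x hx => hms x (by simp [hx]))]
    rw [List.length_set, List.getElem?_set]
    by_cases hk : k < s.length
    · by_cases hmem : (k : Int) ∈ ms
      · simp [hmem, hk]
      · by_cases hmk : m.toNat = k
        · have : (k : Int) = m := by omega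
          simp [hk, hmk, this]
        · have : (k : Int) ≠ m := by omega
          simp [hmem, hk, hmk, this]
    · have h1 : ¬ (((k:Int) ∈ ms) ∧ k < s.length) := by tauto
      have h2 : ¬ ((((k:Int) = m) ∨ ((k:Int) ∈ ms)) ∧ k < s.length) := by tauto
      simp only [List.mem_cons, h1, h2, if_false]
      rw [List.getElem?_eq_none (by omega : s.length ≤ k)]
      split_ifs <;> first | rfl | omega

-- the final sieve list IS the table of is_prime on [0..n]
lemma sieve_eq (n : Int) (hn : 2 ≤ n) :
    ((PySem.List.pyRange 2 (Int.sqrt n + 1) 1).foldl (fun s d =>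
        (PySem.List.pyRange (d * d) (n + 1) d).foldl
          (fun s m => PySem.List.pySetD s m false) s)
      (PySem.List.pySetD (PySem.List.pySetD (List.replicate (n + 1).toNat true) 0 false) 1 false))
    = (PySem.List.pyRange 0 (n + 1) 1).map (fun k => is_prime k) := by
  rw [← List.foldl_flatMap]
  set marks := (PySem.List.pyRange 2 (Int.sqrt n + 1) 1).flatMap
      (fun d => PySem.List.pyRange (d * d) (n + 1) d) with hmarks
  have hmem : ∀ x : Int, x ∈ marks ↔ ∃ d : Int, 2 ≤ d ∧ d * d ≤ x ∧ x < n + 1 ∧ d ∣ x := by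
    intro x
    rw [hmarks, List.mem_flatMap]
    constructor
    · rintro ⟨d, hd, hx⟩
      rw [PySem.List.mem_pyRange_one] at hd
      rw [PySem.List.mem_pyRange_iff_of_pos (by omega)] at hx
      obtain ⟨h1, h2, h3⟩ := hx
      have hdsq : d ∣ d * d := ⟨d, rfl⟩
      refine ⟨d, by omega, h1, h2, ?_⟩
      have := dvd_add h3 hdsq
      simpa using this
    · rintro ⟨d, h2, hdd, hlt, hdvd⟩
      refine ⟨d, ?_, ?_⟩
      · rw [PySem.List.mem_pyRange_one]
        have : d ≤ Int.sqrt n := (le_sqrt_iff n d (by omega) (by omega)).mpr (by omega)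
        omega
      · rw [PySem.List.mem_pyRange_iff_of_pos (by omega)]
        exact ⟨hdd, hlt, dvd_sub hdvd ⟨d, rfl⟩⟩
  have hnonneg : ∀ m ∈ marks, 0 ≤ m := by
    intro m hm; rw [hmem] at hm; obtain ⟨d, h2, hdd, _, _⟩ := hm; nlinarith
  set s0 := PySem.List.pySetD (PySem.List.pySetD (List.replicate (n + 1).toNat true) 0 false) 1 false with hs0
  have hlen0 : s0.length = (n + 1).toNat := by
    rw [hs0, PySem.List.length_pySetD, PySem.List.length_pySetD, List.length_replicate]
  have hs0get : ∀ k : Nat, s0[k]? = if k < (n + 1).toNat then some (decide (2 ≤ k)) else none := by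
    intro k
    rw [hs0]
    rw [PySem.List.pySetD_of_nonneg _ _ (by omega), PySem.List.pySetD_of_nonneg _ _ (by omega)]
    simp only [Int.toNat_zero, Int.toNat_one]
    rw [List.getElem?_set, List.getElem?_set]
    simp only [List.length_set, List.length_replicate, List.getElem?_replicate]
    split_ifs <;> simp_all <;> omega
  apply List.ext_getElem?
  intro k
  rw [setFold_getElem? marks s0 k hnonneg, hlen0, hs0get]
  have hr : ((PySem.List.pyRange 0 (n + 1) 1).map (fun k => is_prime k))[k]? =
      if k < (n + 1).toNat then some (is_prime (k : Int)) else none := by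
    rw [List.getElem?_map, PySem.List.getElem?_pyRange_one]
    simp only [sub_zero, zero_add]
    split_ifs with h
    · simp
    · simp
  rw [hr]
  by_cases hk : k < (n + 1).toNat
  · simp only [hk, if_true, and_true]
    by_cases hm : (k : Int) ∈ marks
    · rw [if_pos hm]
      rw [hmem] at hm
      obtain ⟨d, h2, hdd, hlt, hdvd⟩ := hm
      have : is_prime (k : Int) = false := by
        rw [← Bool.not_eq_true, is_prime_iff]
        push Not
        intro h
        exact ⟨d, h2, by omega, hdvd⟩
      rw [this]
    · rw [if_neg hm]
      congr 1
      rw [hmem] at hm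
      push Not at hm
      by_cases h2k : 2 ≤ k
      · have : is_prime (k : Int) = true := by
          rw [is_prime_iff]
          refine ⟨by omega, fun d hd hdd hdvd => ?_⟩
          exact absurd hdvd (hm d hd (by omega) (by omega))
        simp [this, h2k]
      · have : is_prime (k : Int) = false := by
          rw [← Bool.not_eq_true, is_prime_iff]; omega
        simp [this, h2k]
  · simp [hk]

-- B's any-divisor test equals ¬ is_prime for n ≥ 2
lemma any_iff (n : Int) (hn : 2 ≤ n) :
    (PySem.List.pyRange 2 (Int.sqrt n + 1) 1).any (fun d => PySem.Int.mod n d == 0)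
      = ! is_prime n := by
  rw [is_prime, if_neg (by omega : ¬ n < 2)]
  rw [List.any_eq_not_all_not]

-- ===== VERDICT (by name: the statement is the Claim_ definition above) =====
theorem get_prime_position_spec : Claim_equal_get_prime_position := by
  intro n _
  unfold Spec_get_prime_position
  by_cases h2 : n < 2
  · have hp : is_prime n = false := by rw [← Bool.not_eq_true, is_prime_iff]; omega
    rw [get_prime_position, get_prime_position_alt, if_pos (by simp [hp]), if_pos h2]
  · rw [not_lt] at h2
    rw [get_prime_position, get_prime_position_alt, if_neg (by omega : ¬ n < 2)]
    simp only [any_iff n h2]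
    by_cases hp : is_prime n = true
    · rw [if_neg (by simp [hp]), if_neg (by simp [hp])]
      rw [aLoop_eq n hp 2 0 (by omega)]
      rw [sieve_eq n h2]
      have hfun : (fun (acc : Int) (b : Bool) => acc + (if b then (1:Int) else 0))
          = (fun acc b => if b = true then acc + 1 else acc) := by
        funext a b; cases b <;> simp
      rw [hfun, List.foldl_map, PySem.List.foldl_count_if]
      rw [PySem.List.pyRange_one_cons (by omega : (0:Int) < n + 1)]
      simp only [show (0:Int) + 1 = 1 from rfl]
      rw [PySem.List.pyRange_one_cons (by omega : (1:Int) < n + 1)]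
      simp only [show (1:Int) + 1 = 2 from rfl]
      have h0 : is_prime 0 = false := by rw [← Bool.not_eq_true, is_prime_iff]; omega
      have h1 : is_prime 1 = false := by rw [← Bool.not_eq_true, is_prime_iff]; omega
      simp only [List.countP_cons, h0, h1]
      norm_num
    · rw [if_pos (by simp [hp]), if_pos (by simp [hp])]
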